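-- pv_equiv track=rewrite | github.com/tead1234/BackjoonAlgorithm | Algorithm/vacation_codingtest/타일맞추기.py | bfs
-- ===== SOURCE A (Python) =====
-- from collections import deque
--
-- def bfs(x,n):
--     q = deque()
--     q.append(x)
--     ans = 0
--     while q:
--         x = q.popleft()
--         if x + 1 < n:
--             q.append(x+1)
--         if x + 2 < n:
--             q.append(x+2)
--         elif x + 1 == n:
--             ans += 1
--         elif x + 2 == n:
--             ans += 1
--     return ans % 1000000007
-- ===== SOURCE B (Python) =====
-- def bfs(x, n):
--     d = n - x
--     if d <= 0:
--         return 0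
--     prev, cur = 1, 1
--     for _ in range(d - 1):
--         prev, cur = cur, prev + cur
--     return cur % 1000000007
-- ===== Notes on version B (the rewrite author's own statement) =====
-- stated objective: alternative
-- what changed: Replaced the BFS queue that enumerates every individual step-1/step-2 path from x to n with a linear Fibonacci-style iteration on d = n - x.
import Mathlib
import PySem

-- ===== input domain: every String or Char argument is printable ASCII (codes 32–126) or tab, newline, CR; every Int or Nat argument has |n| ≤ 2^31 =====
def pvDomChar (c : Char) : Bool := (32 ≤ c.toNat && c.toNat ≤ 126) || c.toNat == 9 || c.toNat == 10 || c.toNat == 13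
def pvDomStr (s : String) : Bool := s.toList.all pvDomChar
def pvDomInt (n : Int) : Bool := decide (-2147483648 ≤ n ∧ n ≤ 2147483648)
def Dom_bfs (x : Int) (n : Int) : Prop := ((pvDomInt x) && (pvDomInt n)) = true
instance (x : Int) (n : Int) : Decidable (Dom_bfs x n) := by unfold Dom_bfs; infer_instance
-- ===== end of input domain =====

-- B replaces A's breadth-first enumeration of all step-1/step-2 paths from x to n
-- by a Fibonacci-style linear iteration on d = n - x; objective: alternative algorithm.

-- ===== PORT A =====
-- weight used only for the termination measure of the BFS loop
def bfsWeight (n : Int) (v : Int) : Nat := 3 ^ ((n - v).toNat)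

-- Python's first `if`: append x+1 to the queue when x + 1 < n
def bfsPush1 (n : Int) (x : Int) (rest : List Int) : List Int :=
  if x + 1 < n then rest ++ [x + 1] else rest

lemma bfsPush1_sum (n x : Int) (rest : List Int) :
    ((bfsPush1 n x rest).map (bfsWeight n)).sum
      = (rest.map (bfsWeight n)).sum + (if x + 1 < n then bfsWeight n (x + 1) else 0) := by
  unfold bfsPush1; split_ifs <;> simp

lemma bfsWeight_lt1 (n x : Int) (h : x + 1 < n) : bfsWeight n (x + 1) < bfsWeight n x := by
  unfold bfsWeight
  have h1 : (n - (x + 1)).toNat + 1 = (n - x).toNat := by omega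
  rw [← h1, pow_succ]
  have := pow_pos (show 0 < 3 by norm_num) ((n - (x + 1)).toNat)
  omega

lemma bfsPush1_sum_lt (n x : Int) (rest : List Int) :
    ((bfsPush1 n x rest).map (bfsWeight n)).sum
      < bfsWeight n x + (rest.map (bfsWeight n)).sum := by
  rw [bfsPush1_sum]
  have hp : 0 < bfsWeight n x := by unfold bfsWeight; positivity
  split_ifs with h1
  · have := bfsWeight_lt1 n x h1; omega
  · omega

lemma bfsPush1_sum2_lt (n x : Int) (rest : List Int) (h : x + 2 < n) :
    (((bfsPush1 n x rest) ++ [x + 2]).map (bfsWeight n)).sum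
      < bfsWeight n x + (rest.map (bfsWeight n)).sum := by
  simp only [List.map_append, List.sum_append, List.map_cons, List.sum_cons,
    List.map_nil, List.sum_nil, bfsPush1_sum]
  have h1 : x + 1 < n := by omega
  rw [if_pos h1]
  have w1 := bfsWeight_lt1 n x h1
  have w2 := bfsWeight_lt1 n (x + 1) (by omega)
  have hw : x + 1 + 1 = x + 2 := by ring
  rw [hw] at w2
  unfold bfsWeight at *
  have e1 : (n - (x + 1)).toNat + 1 = (n - x).toNat := by omega
  have e2 : (n - (x + 2)).toNat + 1 = (n - (x + 1)).toNat := by omega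
  rw [← e1, ← e2, pow_succ, pow_succ]
  have := pow_pos (show 0 < 3 by norm_num) ((n - (x + 2)).toNat)
  omega

-- the while-loop of A: queue as a list (popleft = head, append = snoc)
def bfsLoop (n : Int) (q : List Int) (ans : Int) : Int :=
  match q with
  | [] => ans
  | x :: rest =>
    let q1 := bfsPush1 n x rest
    if x + 2 < n then
      bfsLoop n (q1 ++ [x + 2]) ans
    else if x + 1 = n then
      bfsLoop n q1 (ans + 1)
    else if x + 2 = n then
      bfsLoop n q1 (ans + 1)
    else
      bfsLoop n q1 ans
termination_by (q.map (bfsWeight n)).sum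
decreasing_by
  all_goals simp only [List.map_cons, List.sum_cons]
  · exact bfsPush1_sum2_lt n x rest (by omega)
  all_goals exact bfsPush1_sum_lt n x rest

def bfs (x : Int) (n : Int) : Int :=
  PySem.Int.mod (bfsLoop n [x] 0) 1000000007

-- ===== PORT B =====
def bfs_alt (x : Int) (n : Int) : Int :=
  let d := n - x
  if d ≤ 0 then 0
  else
    let pc := (List.range (d - 1).toNat).foldl
      (fun (p : Int × Int) _ => (p.2, p.1 + p.2)) (1, 1)
    PySem.Int.mod pc.2 1000000007

-- ===== PRECONDITION & SPEC =====
def Spec_bfs (x : Int) (n : Int) (out : Int) : Prop := out = bfs_alt x n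
instance (x : Int) (n : Int) (out : Int) : Decidable (Spec_bfs x n out) := by unfold Spec_bfs; infer_instance

-- ===== CLAIM (what is proved, stated in full; the proofs are below) =====
def Claim_equal_bfs : Prop := ∀ (x : Int) (n : Int), Dom_bfs x n → Spec_bfs x n (bfs x n)

-- ===== LEMMAS AND PROOFS =====

-- Fibonacci with F 0 = F 1 = 1
def pvFib : Nat → Int
  | 0 => 1
  | 1 => 1
  | (k + 2) => pvFib k + pvFib (k + 1)

-- number of paths A counts from v to n
def pvG (d : Nat) : Int := if d = 0 then 0 else pvFib d

lemma pvG_sum_push1 (n x : Int) (rest : List Int) :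
    ((bfsPush1 n x rest).map (fun v => pvG ((n - v).toNat))).sum
      = (rest.map (fun v => pvG ((n - v).toNat))).sum
        + (if x + 1 < n then pvG ((n - (x + 1)).toNat) else 0) := by
  unfold bfsPush1; split_ifs <;> simp

lemma bfsLoop_sum (n : Int) (q : List Int) (ans : Int) :
    bfsLoop n q ans = ans + (q.map (fun v => pvG ((n - v).toNat))).sum := by
  fun_induction bfsLoop n q ans with
  | case1 => simp
  | case2 ans x rest q1 h2 ih =>
    rw [ih]
    simp only [q1, List.map_append, List.sum_append, List.map_cons, List.sum_cons,
      List.map_nil, List.sum_nil, pvG_sum_push1]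
    have h1 : x + 1 < n := by omega
    obtain ⟨k, hk⟩ : ∃ k, (n - x).toNat = k + 3 := ⟨(n - x).toNat - 3, by omega⟩
    have e1 : (n - (x + 1)).toNat = k + 2 := by omega
    have e2 : (n - (x + 2)).toNat = k + 1 := by omega
    rw [if_pos h1, hk, e1, e2]
    simp only [pvG, pvFib]
    simp
    omega
  | case3 ans x rest q1 h2 h1eq ih =>
    rw [ih]
    simp only [q1, List.map_cons, List.sum_cons, pvG_sum_push1]
    have h1 : ¬ (x + 1 < n) := by omega
    have e : (n - x).toNat = 1 := by omega
    rw [if_neg h1, e]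
    simp [pvG, pvFib]
    omega
  | case4 ans x rest q1 h2 h1eq h2eq ih =>
    rw [ih]
    simp only [q1, List.map_cons, List.sum_cons, pvG_sum_push1]
    have h1 : x + 1 < n := by omega
    have e0 : (n - x).toNat = 2 := by omega
    have e1 : (n - (x + 1)).toNat = 1 := by omega
    rw [if_pos h1, e0, e1]
    simp [pvG, pvFib]
    omega
  | case5 ans x rest q1 h2 h1eq h2eq ih =>
    rw [ih]
    simp only [q1, List.map_cons, List.sum_cons, pvG_sum_push1]
    have h1 : ¬ (x + 1 < n) := by omega
    have e : (n - x).toNat = 0 := by omega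
    rw [if_neg h1, e]
    simp [pvG]

lemma foldl_fib (k : Nat) :
    (List.range k).foldl (fun (p : Int × Int) _ => (p.2, p.1 + p.2)) (1, 1)
      = (pvFib k, pvFib (k + 1)) := by
  induction k with
  | zero => simp [pvFib]
  | succ m ih =>
    rw [List.range_succ, List.foldl_append, ih]
    simp [pvFib]

lemma bfs_alt_eq (x n : Int) :
    bfs_alt x n = PySem.Int.mod (pvG ((n - x).toNat)) 1000000007 := by
  unfold bfs_alt
  by_cases h : n - x ≤ 0
  · have e : (n - x).toNat = 0 := by omega
    simp [h, e, pvG, PySem.Int.mod]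
  · simp only [if_neg h]
    rw [foldl_fib]
    have e : (n - x - 1).toNat + 1 = (n - x).toNat := by omega
    have e2 : pvG ((n - x).toNat) = pvFib ((n - x - 1).toNat + 1) := by
      rw [e]; simp only [pvG, if_neg (by omega : ¬ (n - x).toNat = 0)]
    rw [e2]

-- ===== VERDICT (by name: the statement is the Claim_ definition above) =====
theorem bfs_spec : Claim_equal_bfs := by
  intro x n _
  unfold Spec_bfs bfs
  rw [bfs_alt_eq, bfsLoop_sum]
  simp
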